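-- pv_equiv track=rewrite | github.com/JianJinglin/foldseek-pocket-miner | kamaji/kamaji.py | _calc_chem_formula_difference
-- ===== SOURCE A (Python) =====
-- def _calc_chem_formula_difference(elements1, elements2):
--     """ score based on brute formula analysis, the lower the better
--         one extra element type  : +1
--         one extra element count : +1
--     """
--     score = 0
--     for e1, count1 in list(elements1.items()):
--         if not e1 in elements2:
--             score += 1
--         else:
--             score += abs(elements1[e1] - elements2[e1])
--     for e2, count2 in list(elements2.items()):
--         if not e2 in elements1:
--             score += elements2[e2]
--     return score
-- ===== SOURCE B (Python) =====
-- def _calc_chem_formula_difference(elements1, elements2):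
--     """Sort both key lists and score them with a two-pointer merge scan."""
--     ks1 = sorted(elements1)
--     ks2 = sorted(elements2)
--     i = j = 0
--     score = 0
--     while i < len(ks1) and j < len(ks2):
--         a, b = ks1[i], ks2[j]
--         if a == b:
--             score += abs(elements1[a] - elements2[b])
--             i += 1
--             j += 1
--         elif a < b:
--             score += 1
--             i += 1
--         else:
--             score += elements2[b]
--             j += 1
--     score += len(ks1) - i
--     score += sum(elements2[k] for k in ks2[j:])
--     return score
-- ===== Notes on version B (the rewrite author's own statement) =====
-- stated objective: alternative
-- what changed: Replaces A's two hash-lookup passes over the dicts with a sort-then-merge algorithm: both key lists are sorted and a single two-pointer merge scan classifies each key as shared / only-in-1 / only-in-2.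
import Mathlib
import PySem

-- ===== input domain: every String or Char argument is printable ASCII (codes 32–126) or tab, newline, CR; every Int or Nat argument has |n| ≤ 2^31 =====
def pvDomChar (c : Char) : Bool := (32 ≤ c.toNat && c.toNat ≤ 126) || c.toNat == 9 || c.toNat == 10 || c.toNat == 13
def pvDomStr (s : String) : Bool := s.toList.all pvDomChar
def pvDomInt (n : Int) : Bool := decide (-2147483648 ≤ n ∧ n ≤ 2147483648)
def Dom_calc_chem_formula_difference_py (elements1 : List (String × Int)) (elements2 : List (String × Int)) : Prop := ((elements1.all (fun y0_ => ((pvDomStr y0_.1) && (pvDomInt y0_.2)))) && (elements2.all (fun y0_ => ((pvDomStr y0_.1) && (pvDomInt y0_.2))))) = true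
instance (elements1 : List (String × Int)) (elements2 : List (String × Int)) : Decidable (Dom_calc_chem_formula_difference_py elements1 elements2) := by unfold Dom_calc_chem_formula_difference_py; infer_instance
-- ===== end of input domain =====

-- B replaces A's two hash-lookup passes with a sort-then-merge algorithm: both key lists are
-- sorted and one two-pointer merge scan does the scoring (objective: alternative algorithm).

-- ===== PORT A =====
def calc_chem_formula_difference_py (elements1 : List (String × Int)) (elements2 : List (String × Int)) : Int :=
  let d1 := PySem.Dict.mk elements1
  let d2 := PySem.Dict.mk elements2
  let score1 : Int := elements1.foldl (fun score p =>
      if !(d2.contains p.1) then score + 1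
      else score + |d1.getD p.1 0 - d2.getD p.1 0|) 0
  elements2.foldl (fun score p =>
      if !(d1.contains p.1) then score + d2.getD p.1 0
      else score) score1

-- ===== PORT B =====
-- the while-loop of Source B: two cursors over the two sorted key lists; when one side is
-- exhausted, the Python adds len(ks1) - i and the counts of the unseen tail of ks2
def pvMergeScan (d1 d2 : PySem.Dict String Int) : List String → List String → Int → Int
  | l1, [], score => score + (l1.length : Int) + 0
  | [], l2, score => score + 0 + (l2.map (fun k => d2.getD k 0)).sum
  | a :: t1, b :: t2, score =>
    if a = b then pvMergeScan d1 d2 t1 t2 (score + |d1.getD a 0 - d2.getD b 0|)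
    else if a < b then pvMergeScan d1 d2 t1 (b :: t2) (score + 1)
    else pvMergeScan d1 d2 (a :: t1) t2 (score + d2.getD b 0)
  termination_by l1 l2 _ => l1.length + l2.length

def calc_chem_formula_difference_py_alt (elements1 : List (String × Int)) (elements2 : List (String × Int)) : Int :=
  let d1 := PySem.Dict.mk elements1
  let d2 := PySem.Dict.mk elements2
  let ks1 := PySem.List.sorted d1.keys (fun x => x) false
  let ks2 := PySem.List.sorted d2.keys (fun x => x) false
  pvMergeScan d1 d2 ks1 ks2 0

-- ===== PRECONDITION & SPEC =====
-- Pre_ requires both association lists to have no duplicate keys: they represent Python dicts,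
-- which cannot contain duplicate keys, so this excludes no input the Python function can receive.
def Pre_calc_chem_formula_difference_py (elements1 : List (String × Int)) (elements2 : List (String × Int)) : Prop :=
  (elements1.map Prod.fst).Nodup ∧ (elements2.map Prod.fst).Nodup
instance (elements1 : List (String × Int)) (elements2 : List (String × Int)) : Decidable (Pre_calc_chem_formula_difference_py elements1 elements2) := by unfold Pre_calc_chem_formula_difference_py; infer_instance

def pvWitness_calc_chem_formula_difference_py : (List (String × Int)) × (List (String × Int)) :=
  ([("C", 6), ("H", 12), ("N", 1)], [("C", 5), ("O", 2)])

def Spec_calc_chem_formula_difference_py (elements1 : List (String × Int)) (elements2 : List (String × Int)) (out : Int) : Prop := out = calc_chem_formula_difference_py_alt elements1 elements2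
instance (elements1 : List (String × Int)) (elements2 : List (String × Int)) (out : Int) : Decidable (Spec_calc_chem_formula_difference_py elements1 elements2 out) := by unfold Spec_calc_chem_formula_difference_py; infer_instance

-- ===== CLAIM (what is proved, stated in full; the proofs are below) =====
def Claim_equal_calc_chem_formula_difference_py : Prop := ∀ (elements1 : List (String × Int)) (elements2 : List (String × Int)), Dom_calc_chem_formula_difference_py elements1 elements2 → Pre_calc_chem_formula_difference_py elements1 elements2 → Spec_calc_chem_formula_difference_py elements1 elements2 (calc_chem_formula_difference_py elements1 elements2)

-- ===== LEMMAS AND PROOFS =====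

-- a foldl whose step always adds g x equals the start plus the sum of the increments
theorem pv_foldl_add_of {α : Type} (l : List α) (f : Int → α → Int) (g : α → Int) (a : Int)
    (h : ∀ s x, f s x = s + g x) : l.foldl f a = a + (l.map g).sum := by
  induction l generalizing a with
  | nil => simp
  | cons x t ih => simp only [List.foldl_cons, List.map_cons, List.sum_cons, ih, h]; ring

theorem pv_dict_contains_mk (l : List (String × Int)) (x : String) :
    PySem.Dict.contains (PySem.Dict.mk l) x = decide (x ∈ l.map Prod.fst) := by
  induction l with
  | nil => simp [PySem.Dict.contains]
  | cons p t ih =>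
    simp only [PySem.Dict.contains] at ih ⊢
    show ((p :: t).any fun q => q.1 == x) = decide (x ∈ (p :: t).map Prod.fst)
    by_cases h : p.1 = x
    · subst h; simp
    · have hb : (p.1 == x) = false := beq_eq_false_iff_ne.mpr h
      simp [List.any_cons, hb, List.mem_cons, Ne.symm h, ih]

-- the merge scan of two strictly increasing key lists computes, in one pass, the sum of the
-- per-key contributions of both lists
theorem pv_mergeScan_eq (d1 d2 : PySem.Dict String Int) (l1 : List String) :
    ∀ (l2 : List String), l1.Pairwise (· < ·) → l2.Pairwise (· < ·) → ∀ s : Int,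
    pvMergeScan d1 d2 l1 l2 s
      = s + (l1.map (fun a => if a ∈ l2 then |d1.getD a 0 - d2.getD a 0| else 1)).sum
          + (l2.map (fun b => if b ∈ l1 then 0 else d2.getD b 0)).sum := by
  induction l1 with
  | nil =>
    intro l2 _ _ s
    cases l2 <;> simp [pvMergeScan]
  | cons a t1 ih1 =>
    intro l2 hp1 hp2 s
    have ha1 : ∀ x ∈ t1, a < x := fun x hx => (List.pairwise_cons.mp hp1).1 x hx
    have ht1 : t1.Pairwise (· < ·) := (List.pairwise_cons.mp hp1).2
    revert hp2 s
    induction l2 with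
    | nil => intro _ s; simp [pvMergeScan]; omega
    | cons b t2 ih2 =>
      intro hp2 s
      have hb2 : ∀ y ∈ t2, b < y := fun y hy => (List.pairwise_cons.mp hp2).1 y hy
      have ht2 : t2.Pairwise (· < ·) := (List.pairwise_cons.mp hp2).2
      rcases lt_trichotomy a b with hab | hab | hab
      · -- a < b : a is only in ks1
        have hstep : pvMergeScan d1 d2 (a :: t1) (b :: t2) s
            = pvMergeScan d1 d2 t1 (b :: t2) (s + 1) := by
          rw [pvMergeScan]; rw [if_neg (ne_of_lt hab), if_pos hab]
        rw [hstep, ih1 (b :: t2) ht1 hp2 (s + 1)]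
        have hamem : a ∉ b :: t2 := by
          intro h
          rcases List.mem_cons.mp h with h | h
          · exact absurd (h ▸ hab) (lt_irrefl a)
          · exact absurd (lt_trans hab (hb2 a h)) (lt_irrefl a)
        have hsnd : (b :: t2).map (fun y => if y ∈ t1 then (0:Int) else d2.getD y 0)
            = (b :: t2).map (fun y => if y ∈ a :: t1 then (0:Int) else d2.getD y 0) := by
          apply List.map_congr_left
          intro y hy
          have hya : y ≠ a := by
            rcases List.mem_cons.mp hy with h | h
            · intro he; exact absurd hab (by rw [← he, h]; exact lt_irrefl b)
            · intro he; subst he; exact absurd (lt_trans hab (hb2 _ h)) (lt_irrefl _)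
          by_cases hmem : y ∈ t1
          · rw [if_pos hmem, if_pos (List.mem_cons.mpr (Or.inr hmem))]
          · rw [if_neg hmem, if_neg (by simp [List.mem_cons, hya, hmem])]
        rw [hsnd]
        simp only [List.map_cons, List.sum_cons, if_neg hamem]
        ring
      · -- a = b : shared key
        subst hab
        have hstep : pvMergeScan d1 d2 (a :: t1) (a :: t2) s
            = pvMergeScan d1 d2 t1 t2 (s + |d1.getD a 0 - d2.getD a 0|) := by
          rw [pvMergeScan]; rw [if_pos rfl]
        rw [hstep, ih1 t2 ht1 ht2 (s + |d1.getD a 0 - d2.getD a 0|)]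
        have hfst : t1.map (fun x => if x ∈ t2 then |d1.getD x 0 - d2.getD x 0| else 1)
            = t1.map (fun x => if x ∈ a :: t2 then |d1.getD x 0 - d2.getD x 0| else 1) := by
          apply List.map_congr_left
          intro x hx
          have hxa : x ≠ a := fun he => absurd (he ▸ ha1 x hx) (lt_irrefl a)
          by_cases hmem : x ∈ t2
          · rw [if_pos hmem, if_pos (List.mem_cons.mpr (Or.inr hmem))]
          · rw [if_neg hmem, if_neg (by simp [List.mem_cons, hxa, hmem])]
        have hsnd : t2.map (fun y => if y ∈ t1 then (0:Int) else d2.getD y 0)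
            = t2.map (fun y => if y ∈ a :: t1 then (0:Int) else d2.getD y 0) := by
          apply List.map_congr_left
          intro y hy
          have hya : y ≠ a := fun he => absurd (he ▸ hb2 y hy) (lt_irrefl a)
          by_cases hmem : y ∈ t1
          · rw [if_pos hmem, if_pos (List.mem_cons.mpr (Or.inr hmem))]
          · rw [if_neg hmem, if_neg (by simp [List.mem_cons, hya, hmem])]
        rw [hfst, hsnd]
        simp only [List.map_cons, List.sum_cons,
          if_pos (List.mem_cons_self (a := a))]
        ring
      · -- b < a : b is only in ks2
        have hstep : pvMergeScan d1 d2 (a :: t1) (b :: t2) s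
            = pvMergeScan d1 d2 (a :: t1) t2 (s + d2.getD b 0) := by
          rw [pvMergeScan]
          rw [if_neg (Ne.symm (ne_of_lt hab)), if_neg (not_lt_of_gt hab)]
        rw [hstep, ih2 ht2 (s + d2.getD b 0)]
        have hbmem : b ∉ a :: t1 := by
          intro h
          rcases List.mem_cons.mp h with h | h
          · exact absurd (h ▸ hab) (lt_irrefl b)
          · exact absurd (lt_trans hab (ha1 b h)) (lt_irrefl b)
        have hfst : (a :: t1).map (fun x => if x ∈ t2 then |d1.getD x 0 - d2.getD x 0| else 1)
            = (a :: t1).map (fun x => if x ∈ b :: t2 then |d1.getD x 0 - d2.getD x 0| else 1) := by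
          apply List.map_congr_left
          intro x hx
          have hxb : x ≠ b := by
            rcases List.mem_cons.mp hx with h | h
            · intro he; exact absurd hab (by rw [← he, h]; exact lt_irrefl a)
            · intro he; subst he; exact absurd (lt_trans hab (ha1 _ h)) (lt_irrefl _)
          by_cases hmem : x ∈ t2
          · rw [if_pos hmem, if_pos (List.mem_cons.mpr (Or.inr hmem))]
          · rw [if_neg hmem, if_neg (by simp [List.mem_cons, hxb, hmem])]
        rw [hfst]
        simp only [List.map_cons, List.sum_cons, if_neg hbmem]
        ring

-- sums of identical per-key contributions are invariant under the sort (a permutation)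
theorem pv_sum_perm {α : Type} {l l' : List α} (h : l.Perm l') (g : α → Int) :
    (l.map g).sum = (l'.map g).sum := (h.map g).sum_eq

-- ===== VERDICT (by name: the statement is the Claim_ definition above) =====
theorem calc_chem_formula_difference_py_spec : Claim_equal_calc_chem_formula_difference_py := by
  intro e1 e2 _hdom hpre
  obtain ⟨h1, h2⟩ := hpre
  unfold Spec_calc_chem_formula_difference_py
  unfold calc_chem_formula_difference_py calc_chem_formula_difference_py_alt
  simp only []
  set d1 := PySem.Dict.mk e1 with hd1
  set d2 := PySem.Dict.mk e2 with hd2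
  set k1 : List String := e1.map Prod.fst with hk1
  set k2 : List String := e2.map Prod.fst with hk2
  have hkeys1 : d1.keys = k1 := rfl
  have hkeys2 : d2.keys = k2 := rfl
  set sk1 := PySem.List.sorted d1.keys (fun x => x) false with hsk1
  set sk2 := PySem.List.sorted d2.keys (fun x => x) false with hsk2
  have hperm1 : sk1.Perm k1 := hkeys1 ▸ PySem.List.sorted_perm d1.keys (fun x => x) false
  have hperm2 : sk2.Perm k2 := hkeys2 ▸ PySem.List.sorted_perm d2.keys (fun x => x) false
  -- the sorted key lists are strictly increasing (sorted + keys duplicate-free)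
  have hstrict1 : sk1.Pairwise (· < ·) :=
    ((PySem.List.sorted_pairwise d1.keys (fun x => x)).imp₂ (fun _ _ hle hne => lt_of_le_of_ne hle hne)
      (hperm1.nodup_iff.mpr h1))
  have hstrict2 : sk2.Pairwise (· < ·) :=
    ((PySem.List.sorted_pairwise d2.keys (fun x => x)).imp₂ (fun _ _ hle hne => lt_of_le_of_ne hle hne)
      (hperm2.nodup_iff.mpr h2))
  -- B's merge scan as two sums over the sorted key lists
  rw [pv_mergeScan_eq d1 d2 sk1 sk2 hstrict1 hstrict2 0]
  -- membership in a sorted list is membership in the original keys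
  have hmem1 : ∀ x, x ∈ sk1 ↔ x ∈ k1 := by
    intro x; rw [hsk1, PySem.List.mem_sorted, hkeys1]
  have hmem2 : ∀ x, x ∈ sk2 ↔ x ∈ k2 := by
    intro x; rw [hsk2, PySem.List.mem_sorted, hkeys2]
  -- A's two loops as two sums over the original pair lists
  rw [pv_foldl_add_of e1 _ (fun p => if !(d2.contains p.1) then 1 else |d1.getD p.1 0 - d2.getD p.1 0|) 0
        (by intro s p; cases hc : d2.contains p.1 <;> simp [hc])]
  rw [pv_foldl_add_of e2 _ (fun p => if !(d1.contains p.1) then d2.getD p.1 0 else 0) _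
        (by intro s p; cases hc : d1.contains p.1 <;> simp [hc])]
  -- first sum: over sk1 = perm of k1 = map fst e1, same per-key contribution
  have hfst : (sk1.map (fun a => if a ∈ sk2 then |d1.getD a 0 - d2.getD a 0| else 1)).sum
      = (e1.map (fun p => if !(d2.contains p.1) then 1 else |d1.getD p.1 0 - d2.getD p.1 0|)).sum := by
    rw [pv_sum_perm hperm1, hk1, List.map_map]
    apply congrArg
    apply List.map_congr_left
    intro p _
    have hc : d2.contains p.1 = decide (p.1 ∈ k2) := by rw [hd2]; exact pv_dict_contains_mk e2 p.1
    by_cases h : p.1 ∈ k2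
    · simp [Function.comp, hc, hmem2, h]
    · simp [Function.comp, hc, hmem2, h]
  have hsnd : (sk2.map (fun b => if b ∈ sk1 then (0:Int) else d2.getD b 0)).sum
      = (e2.map (fun p => if !(d1.contains p.1) then d2.getD p.1 0 else 0)).sum := by
    rw [pv_sum_perm hperm2, hk2, List.map_map]
    apply congrArg
    apply List.map_congr_left
    intro p _
    have hc : d1.contains p.1 = decide (p.1 ∈ k1) := by rw [hd1]; exact pv_dict_contains_mk e1 p.1
    by_cases h : p.1 ∈ k1
    · simp [Function.comp, hc, hmem1, h]
    · simp [Function.comp, hc, hmem1, h]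
  rw [hfst, hsnd]
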